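-- pv_equiv track=rewrite | github.com/el-iot/themerator | sweet16.py | prominence
-- ===== SOURCE A (Python) =====
-- def prominence(rgb, highlights) -> int:
--     """
--     Score a colour based on the prominence of highlights
--
--     Parameters
--     ----------
--     rgb : tuple: the chosen colour
--     highlights : list : which primary colours are desired
--
--     Returns
--     -------
--     An integer
--     """
--     if not isinstance(highlights, list):
--         highlights = [highlights]
--
--     if any(highlight not in ["red", "green", "blue"] for highlight in highlights):
--         raise ValueError("Bad highlight selection")
--
--     desired, undesired = [], []
--     for colour, string in zip(rgb, ["red", "green", "blue"]):
--         if string in highlights: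
--             desired.append(colour)
--         else:
--             undesired.append(colour)
--
--     return min([d - u for d in desired for u in undesired])
-- ===== SOURCE B (Python) =====
-- def prominence(rgb, highlights) -> int:
--     """
--     Score a colour based on the prominence of highlights
--
--     Closed form: the minimum pairwise difference desired - undesired
--     equals min(desired) - max(undesired).
--     """
--     if not isinstance(highlights, list):
--         highlights = [highlights]
--
--     if any(h not in ("red", "green", "blue") for h in highlights):
--         raise ValueError("Bad highlight selection")
--
--     names = ("red", "green", "blue")
--     desired = [c for c, s in zip(rgb, names) if s in highlights]
--     undesired = [c for c, s in zip(rgb, names) if s not in highlights]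
--
--     return min(desired) - max(undesired)
-- ===== Notes on version B (the rewrite author's own statement) =====
-- stated objective: simpler
-- what changed: Replaces the nested pairwise comprehension min([d-u for d in desired for u in undesired]) with the closed form min(desired) - max(undesired), two independent linear reductions instead of a product scan over all pairs.
import Mathlib
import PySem

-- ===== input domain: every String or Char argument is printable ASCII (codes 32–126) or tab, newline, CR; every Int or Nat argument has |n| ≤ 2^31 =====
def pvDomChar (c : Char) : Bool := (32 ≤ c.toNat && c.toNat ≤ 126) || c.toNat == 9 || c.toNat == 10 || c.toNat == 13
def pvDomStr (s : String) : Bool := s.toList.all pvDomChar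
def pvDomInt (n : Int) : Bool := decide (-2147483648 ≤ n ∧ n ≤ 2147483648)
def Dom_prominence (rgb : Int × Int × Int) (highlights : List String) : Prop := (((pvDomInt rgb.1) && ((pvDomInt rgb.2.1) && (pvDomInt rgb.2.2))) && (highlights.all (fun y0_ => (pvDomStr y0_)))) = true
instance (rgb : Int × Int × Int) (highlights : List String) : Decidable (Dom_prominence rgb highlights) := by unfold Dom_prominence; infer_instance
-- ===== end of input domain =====

-- B replaces the nested pairwise comprehension by the closed form min(desired) - max(undesired); objective: simpler.

-- B replaces the nested pairwise comprehension min([d-u for d in desired for u in undesired])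
-- by the closed form min(desired) - max(undesired); objective: simpler (no claim about speed).

-- ===== PORT A =====
-- literal port of A: partition rgb into desired/undesired by a loop over zip(rgb, names),
-- then min over the list of all pairwise differences d - u.  The two raising points
-- (bad highlight name -> ValueError; min([]) -> ValueError) are excluded by Pre_prominence;
-- there the port returns 0 (a value outside every claim).
def prominence (rgb : Int × Int × Int) (highlights : List String) : Int :=
  if highlights.any (fun h => !(["red", "green", "blue"].contains h)) then 0  -- raise ValueError
  else
    let zipped : List (Int × String) := [(rgb.1, "red"), (rgb.2.1, "green"), (rgb.2.2, "blue")]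
    let du := zipped.foldl
      (fun (du : List Int × List Int) cs =>
        if highlights.contains cs.2 then (du.1 ++ [cs.1], du.2) else (du.1, du.2 ++ [cs.1]))
      ([], [])
    (PySem.List.min? (du.1.flatMap (fun d => du.2.map (fun u => d - u))) (fun x => x)).getD 0

-- ===== PORT B =====
-- literal port of B: two filters, then min(desired) - max(undesired); same raising
-- points as A, same placeholder 0 outside Pre_prominence
def prominence_alt (rgb : Int × Int × Int) (highlights : List String) : Int :=
  if highlights.any (fun h => !(["red", "green", "blue"].contains h)) then 0  -- raise ValueError
  else
    let zipped : List (Int × String) := [(rgb.1, "red"), (rgb.2.1, "green"), (rgb.2.2, "blue")]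
    let desired := (zipped.filter (fun cs => highlights.contains cs.2)).map (·.1)
    let undesired := (zipped.filter (fun cs => !highlights.contains cs.2)).map (·.1)
    (PySem.List.min? desired (fun x => x)).getD 0 - (PySem.List.max? undesired (fun x => x)).getD 0

-- ===== PRECONDITION & SPEC =====
-- Pre_: exactly where A returns: every highlight is one of "red"/"green"/"blue"
-- (else the explicit raise ValueError) and the desired/undesired partition is
-- non-trivial (else A's min([]) raises ValueError)
def Pre_prominence (rgb : Int × Int × Int) (highlights : List String) : Prop :=
  (highlights.all (fun h => ["red", "green", "blue"].contains h)) = true ∧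
  (["red", "green", "blue"].any (fun s => highlights.contains s)) = true ∧
  (["red", "green", "blue"].any (fun s => !highlights.contains s)) = true
instance (rgb : Int × Int × Int) (highlights : List String) : Decidable (Pre_prominence rgb highlights) := by unfold Pre_prominence; infer_instance

def pvWitness_prominence : (Int × Int × Int) × List String := ((10, 20, 30), ["red"])

def Spec_prominence (rgb : Int × Int × Int) (highlights : List String) (out : Int) : Prop := out = prominence_alt rgb highlights
instance (rgb : Int × Int × Int) (highlights : List String) (out : Int) : Decidable (Spec_prominence rgb highlights out) := by unfold Spec_prominence; infer_instance

-- ===== CLAIM (what is proved, stated in full; the proofs are below) =====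
def Claim_equal_prominence : Prop := ∀ (rgb : Int × Int × Int) (highlights : List String), Dom_prominence rgb highlights → Pre_prominence rgb highlights → Spec_prominence rgb highlights (prominence rgb highlights)

-- ===== LEMMAS AND PROOFS =====

-- ===== VERDICT (by name: the statement is the Claim_ definition above) =====
theorem prominence_spec : Claim_equal_prominence := by
  intro rgb highlights _ hpre
  obtain ⟨-, hsome, hnot⟩ := hpre
  unfold Spec_prominence prominence prominence_alt
  split_ifs with hbad
  · rfl
  · simp only [List.any_cons, List.any_nil, Bool.or_eq_true, Bool.or_false,
      List.contains_eq_mem, decide_eq_true_eq, Bool.not_eq_true', decide_eq_false_iff_not]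
      at hsome hnot
    by_cases hr : "red" ∈ highlights <;>
    by_cases hg : "green" ∈ highlights <;>
    by_cases hb : "blue" ∈ highlights <;>
      first
        | tauto
        | (simp [hr, hg, hb, PySem.List.min?_id_cons, PySem.List.max?_id_cons]; omega)
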